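-- pv_equiv track=rewrite | github.com/pypi-data/pypi-mirror-379 | packages/sonusai/sonusai-1.1.0-cp311-abi3-manylinux_2_34_aarch64.whl/sonusai/__init__.py | commands_list
-- ===== SOURCE A (Python) =====
-- commands_doc = """
--    audiofe                      Audio front end
--    calc_metric_spenh            Run speech enhancement and analysis
--    doc                          Documentation
--    genft                        Generate feature and truth data
--    genmetrics                   Generate mixture metrics data
--    genmix                       Generate mixture and truth data
--    genmixdb                     Generate a mixture database
--    lsdb                         List information about a mixture database
--    metrics_summary              Summarize generated metrics in a mixture database
--    mkwav                        Make WAV files from a mixture database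
--    onnx_predict                 Run ONNX predict on a trained model
--    vars                         List custom SonusAI variables
-- """
--
-- def commands_list(doc: str = commands_doc) -> list[str]:
--     """Parse commands from a documentation string"""
--     commands = []
--     for line in doc.strip().split("\n"):
--         line = line.strip()
--         if line:
--             # Get the first word that's not empty
--             parts = line.split()
--             if parts:
--                 commands.append(parts[0])
--     return commands
-- ===== SOURCE B (Python) =====
-- commands_doc = """
--    audiofe                      Audio front end
--    calc_metric_spenh            Run speech enhancement and analysis
--    doc                          Documentation
--    genft                        Generate feature and truth data
--    genmetrics                   Generate mixture metrics data
--    genmix                       Generate mixture and truth data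
--    genmixdb                     Generate a mixture database
--    lsdb                         List information about a mixture database
--    metrics_summary              Summarize generated metrics in a mixture database
--    mkwav                        Make WAV files from a mixture database
--    onnx_predict                 Run ONNX predict on a trained model
--    vars                         List custom SonusAI variables
-- """
--
-- def commands_list(doc: str = commands_doc) -> list[str]:
--     """Parse commands from a documentation string (single-character-scan state machine)."""
--     commands = []
--     buf = []
--     taken = False  # first word of the current line already emitted
--     for ch in doc:
--         if ch in " \t\n\r\x0b\x0c":
--             if buf:
--                 commands.append("".join(buf))
--                 buf = []
--                 taken = True
--             if ch == "\n":
--                 taken = False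
--         elif not taken:
--             buf.append(ch)
--     if buf:
--         commands.append("".join(buf))
--     return commands
-- ===== Notes on version B (the rewrite author's own statement) =====
-- stated objective: alternative
-- what changed: Replaces A's document-strip, newline-split and per-line strip+split passes with a single left-to-right character-scan state machine that collects the first word of each line on the fly, building no intermediate line or word lists.
import Mathlib
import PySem

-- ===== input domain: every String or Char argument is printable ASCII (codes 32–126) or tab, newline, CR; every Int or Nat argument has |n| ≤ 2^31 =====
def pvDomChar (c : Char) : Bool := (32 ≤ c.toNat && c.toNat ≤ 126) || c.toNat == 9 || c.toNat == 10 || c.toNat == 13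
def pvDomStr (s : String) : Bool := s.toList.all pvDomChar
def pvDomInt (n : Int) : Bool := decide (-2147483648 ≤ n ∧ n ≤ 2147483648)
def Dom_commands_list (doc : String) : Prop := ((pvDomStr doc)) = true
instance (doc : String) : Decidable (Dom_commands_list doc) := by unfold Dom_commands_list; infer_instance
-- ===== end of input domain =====

-- B replaces A's strip / split("\n") / per-line strip+split passes by a single left-to-right
-- character scan that collects the first word of each line on the fly (objective: alternative).

-- ===== PORT A =====
-- Python A: strip the doc, split on "\n"; for each line: strip it, if non-empty split it
-- and append parts[0] if any.  (Strings are handled as their character lists.)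
def commands_list (doc : String) : List String :=
  (PySem.Chars.splitOn (PySem.Chars.strip doc.toList) ['\n']).foldl
    (fun commands line =>
      let l := PySem.Chars.strip line
      if l ≠ [] then
        let parts := PySem.Chars.split₀ l
        if parts ≠ [] then commands ++ [String.ofList (parts.headD [])] else commands
      else commands) []

-- ===== PORT B =====
-- Python's membership test `ch in " \t\n\r\x0b\x0c"`
def pvIsWs (c : Char) : Bool := [' ', '\t', '\n', '\r', Char.ofNat 11, Char.ofNat 12].contains c

-- one step of B's loop body; state = (commands, buf, taken)
def pvStep (st : List String × List Char × Bool) (c : Char) : List String × List Char × Bool :=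
  let (commands, buf, taken) := st
  if pvIsWs c then
    let (commands, buf, taken) :=
      if buf ≠ [] then (commands ++ [String.ofList buf], ([] : List Char), true)
      else (commands, buf, taken)
    (commands, buf, if c = '\n' then false else taken)
  else if !taken then (commands, buf ++ [c], taken)
  else (commands, buf, taken)

def commands_list_alt (doc : String) : List String :=
  let fin := doc.toList.foldl pvStep ([], [], false)
  if fin.2.1 ≠ [] then fin.1 ++ [String.ofList fin.2.1] else fin.1

-- ===== PRECONDITION & SPEC =====
def Spec_commands_list (doc : String) (out : List String) : Prop := out = commands_list_alt doc
instance (doc : String) (out : List String) : Decidable (Spec_commands_list doc out) := by unfold Spec_commands_list; infer_instance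

-- ===== CLAIM (what is proved, stated in full; the proofs are below) =====
def Claim_equal_commands_list : Prop := ∀ (doc : String), Dom_commands_list doc → Spec_commands_list doc (commands_list doc)

-- ===== LEMMAS AND PROOFS =====
def pvTokens : List Char → List (List Char)
  | [] => []
  | c :: rest =>
    if PySem.Chars.isspace c then pvTokens rest
    else (c :: rest.takeWhile (fun d => !PySem.Chars.isspace d)) ::
      pvTokens (rest.dropWhile (fun d => !PySem.Chars.isspace d))
termination_by l => l.length
decreasing_by
  · simp
  · have := List.length_dropWhile_le (fun d => !PySem.Chars.isspace d) rest
    simp; omega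

theorem pvTokens_nil : pvTokens [] = [] := by rw [pvTokens.eq_def]

theorem pvTokens_cons (c : Char) (rest : List Char) :
    pvTokens (c :: rest) =
      if PySem.Chars.isspace c then pvTokens rest
      else (c :: rest.takeWhile (fun d => !PySem.Chars.isspace d)) ::
        pvTokens (rest.dropWhile (fun d => !PySem.Chars.isspace d)) := by
  rw [pvTokens.eq_def]

theorem pvTokens_eq_nil_iff (l : List Char) :
    pvTokens l = [] ↔ ∀ c ∈ l, PySem.Chars.isspace c := by
  induction l with
  | nil => simp [pvTokens_nil]
  | cons c rest ih =>
    rw [pvTokens_cons]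
    by_cases hs : PySem.Chars.isspace c <;> simp [hs, ih]

theorem pvTokens_dropWhile (l : List Char) :
    pvTokens (l.dropWhile PySem.Chars.isspace) = pvTokens l := by
  induction l with
  | nil => simp
  | cons c rest ih =>
    by_cases hs : PySem.Chars.isspace c
    · rw [List.dropWhile_cons_of_pos (by simpa using hs), ih, pvTokens_cons, if_pos hs]
    · rw [List.dropWhile_cons_of_neg (by simpa using hs)]

theorem pvTokens_append_ws (l : List Char) (sfx : List Char)
    (h : ∀ c ∈ sfx, PySem.Chars.isspace c) : pvTokens (l ++ sfx) = pvTokens l := by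
  induction hl : l.length using Nat.strong_induction_on generalizing l with
  | _ n ih =>
    cases l with
    | nil => simpa [pvTokens_nil, pvTokens_eq_nil_iff] using h
    | cons c rest =>
      rw [List.cons_append, pvTokens_cons, pvTokens_cons]
      by_cases hs : PySem.Chars.isspace c
      · rw [if_pos hs, if_pos hs]
        exact ih rest.length (by simp [← hl]) rest rfl
      · rw [if_neg hs, if_neg hs]
        by_cases hall : ∀ d ∈ rest, !PySem.Chars.isspace d
        · have htw : rest.takeWhile (fun d => !PySem.Chars.isspace d) = rest :=
            List.takeWhile_eq_self_iff.mpr hall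
          have hdw : rest.dropWhile (fun d => !PySem.Chars.isspace d) = [] :=
            List.dropWhile_eq_nil_iff.mpr hall
          have hsfxt : sfx.takeWhile (fun d => !PySem.Chars.isspace d) = [] := by
            cases sfx with
            | nil => rfl
            | cons a b => rw [List.takeWhile_cons_of_neg (by simp [h a (by simp)])]
          have hsfxd : sfx.dropWhile (fun d => !PySem.Chars.isspace d) = sfx := by
            cases sfx with
            | nil => rfl
            | cons a b => rw [List.dropWhile_cons_of_neg (by simp [h a (by simp)])]
          have htw2 : (rest ++ sfx).takeWhile (fun d => !PySem.Chars.isspace d) = rest := by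
            rw [List.takeWhile_append, if_pos (by rw [htw]), hsfxt, List.append_nil]
          have hdw2 : (rest ++ sfx).dropWhile (fun d => !PySem.Chars.isspace d) = sfx := by
            rw [List.dropWhile_append, if_pos (by rw [hdw]; rfl), hsfxd]
          rw [htw2, hdw2, htw, hdw, pvTokens_nil, (pvTokens_eq_nil_iff sfx).mpr h]
        · -- rest contains a whitespace char: takeWhile/dropWhile stay inside rest
          have hne : rest.dropWhile (fun d => !PySem.Chars.isspace d) ≠ [] := by
            intro hcon
            exact hall (List.dropWhile_eq_nil_iff.mp hcon)
          have htw2 : (rest ++ sfx).takeWhile (fun d => !PySem.Chars.isspace d)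
              = rest.takeWhile (fun d => !PySem.Chars.isspace d) := by
            rw [List.takeWhile_append, if_neg]
            intro hcon
            have : rest.takeWhile (fun d => !PySem.Chars.isspace d) = rest :=
              (List.takeWhile_sublist _).eq_of_length hcon
            exact hall (List.takeWhile_eq_self_iff.mp this)
          have hdw2 : (rest ++ sfx).dropWhile (fun d => !PySem.Chars.isspace d)
              = rest.dropWhile (fun d => !PySem.Chars.isspace d) ++ sfx := by
            rw [List.dropWhile_append, if_neg (by simpa [List.isEmpty_iff] using hne)]
          rw [htw2, hdw2]
          congr 1
          have hlen := List.length_dropWhile_le (fun d => !PySem.Chars.isspace d) rest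
          exact ih _ (by simp [← hl]; omega) _ rfl

theorem pvTokens_strip (l : List Char) : pvTokens (PySem.Chars.strip l) = pvTokens l := by
  rw [PySem.Chars.strip, PySem.Chars.lstrip, PySem.Chars.rstrip]
  set y := l.dropWhile PySem.Chars.isspace with hy
  have hdec : y = (y.reverse.dropWhile PySem.Chars.isspace).reverse ++
      (y.reverse.takeWhile PySem.Chars.isspace).reverse := by
    conv_lhs => rw [← List.reverse_reverse y, ← List.takeWhile_append_dropWhile
      (p := PySem.Chars.isspace) (l := y.reverse)]
    rw [List.reverse_append]
  calc pvTokens (y.reverse.dropWhile PySem.Chars.isspace).reverse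
      = pvTokens ((y.reverse.dropWhile PySem.Chars.isspace).reverse ++
          (y.reverse.takeWhile PySem.Chars.isspace).reverse) := by
        rw [pvTokens_append_ws]
        intro c hc
        exact List.mem_takeWhile_imp (List.mem_reverse.mp hc)
    _ = pvTokens y := by rw [← hdec]
    _ = pvTokens l := pvTokens_dropWhile l

theorem pvStrip_eq_nil_of_tokens (l : List Char) (h : pvTokens l = []) :
    PySem.Chars.strip l = [] := by
  have hall := (pvTokens_eq_nil_iff l).mp h
  rw [PySem.Chars.strip, PySem.Chars.lstrip]
  have : l.dropWhile PySem.Chars.isspace = [] := List.dropWhile_eq_nil_iff.mpr hall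
  rw [this]
  rfl
theorem pv_split₀_go (s : List Char) : ∀ cur acc,
    PySem.Chars.split₀.go s cur acc =
      acc.reverse ++ (if cur = [] then pvTokens s
        else (cur.reverse ++ s.takeWhile (fun d => !PySem.Chars.isspace d)) ::
          pvTokens (s.dropWhile (fun d => !PySem.Chars.isspace d))) := by
  induction s with
  | nil =>
    intro cur acc
    by_cases h : cur = [] <;>
      simp [PySem.Chars.split₀.go, h, pvTokens_nil, List.isEmpty_iff]
  | cons c rest ih =>
    intro cur acc
    by_cases hs : PySem.Chars.isspace c
    · by_cases h : cur = [] <;>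
        simp [PySem.Chars.split₀.go, hs, h, List.isEmpty_iff, ih, pvTokens_cons]
    · by_cases h : cur = [] <;>
        simp [PySem.Chars.split₀.go, hs, h, ih, pvTokens_cons]

theorem pv_split₀_eq (s : List Char) : PySem.Chars.split₀ s = pvTokens s := by
  have := pv_split₀_go s [] []
  simpa [PySem.Chars.split₀] using this

def pvFw (line : List Char) : List String :=
  match pvTokens line with
  | [] => []
  | p :: _ => [String.ofList p]

theorem pvA_body (commands : List String) (line : List Char) :
    (let l := PySem.Chars.strip line
     if l ≠ [] then
       let parts := PySem.Chars.split₀ l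
       if parts ≠ [] then commands ++ [String.ofList (parts.headD [])] else commands
     else commands) = commands ++ pvFw line := by
  rcases ht : pvTokens line with _ | ⟨w, t⟩
  · have : PySem.Chars.strip line = [] := pvStrip_eq_nil_of_tokens line ht
    simp [this, pvFw, ht]
  · have hne : PySem.Chars.strip line ≠ [] := by
      intro hcon
      have := pvTokens_strip line
      rw [hcon, pvTokens_nil] at this
      rw [ht] at this
      exact absurd this (by simp)
    have hparts : PySem.Chars.split₀ (PySem.Chars.strip line) = w :: t := by
      rw [pv_split₀_eq, pvTokens_strip, ht]
    simp [hne, hparts, pvFw, ht]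

theorem pvA_foldl (lines : List (List Char)) (acc : List String) :
    lines.foldl (fun commands line =>
      let l := PySem.Chars.strip line
      if l ≠ [] then
        let parts := PySem.Chars.split₀ l
        if parts ≠ [] then commands ++ [String.ofList (parts.headD [])] else commands
      else commands) acc = acc ++ lines.flatMap pvFw := by
  induction lines generalizing acc with
  | nil => simp
  | cons line rest ih =>
    rw [List.foldl_cons, List.flatMap_cons]
    rw [show (let l := PySem.Chars.strip line
      if l ≠ [] then
        let parts := PySem.Chars.split₀ l
        if parts ≠ [] then acc ++ [String.ofList (parts.headD [])] else acc
      else acc) = acc ++ pvFw line from pvA_body acc line]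
    rw [ih, List.append_assoc]
-- step facts
theorem pvStep_ws (a : List String) (b : List Char) (t : Bool) (c : Char) (h : pvIsWs c = true) :
    pvStep (a, b, t) c =
      (if b ≠ [] then a ++ [String.ofList b] else a, [],
        if c = '\n' then false else (if b ≠ [] then true else t)) := by
  by_cases hb : b = [] <;> simp [pvStep, h, hb]

theorem pvStep_nonws (a : List String) (b : List Char) (t : Bool) (c : Char) (h : pvIsWs c = false) :
    pvStep (a, b, t) c = if t then (a, b, t) else (a, b ++ [c], t) := by
  cases t <;> simp [pvStep, h]

theorem pvRun_taken (line : List Char) (hd : ∀ c ∈ line, pvIsWs c = PySem.Chars.isspace c)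
    (hn : '\n' ∉ line) (acc : List String) :
    line.foldl pvStep (acc, [], true) = (acc, [], true) := by
  induction line with
  | nil => rfl
  | cons c rest ih =>
    rw [List.foldl_cons]
    have hc : c ≠ '\n' := by intro h; exact hn (h ▸ List.mem_cons_self)
    by_cases hw : pvIsWs c = true
    · rw [pvStep_ws _ _ _ _ hw]
      simp only [ne_eq, not_true_eq_false, if_false, if_neg hc]
      exact ih (fun d hdm => hd d (List.mem_cons_of_mem _ hdm)) (fun h => hn (List.mem_cons_of_mem _ h))
    · rw [pvStep_nonws _ _ _ _ (by simpa using hw), if_pos rfl]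
      exact ih (fun d hdm => hd d (List.mem_cons_of_mem _ hdm)) (fun h => hn (List.mem_cons_of_mem _ h))

theorem pvRun_word (line : List Char) (hd : ∀ c ∈ line, pvIsWs c = PySem.Chars.isspace c)
    (hn : '\n' ∉ line) (acc : List String) (b : List Char) (hb : b ≠ []) :
    line.foldl pvStep (acc, b, false) =
      (if line.dropWhile (fun d => !PySem.Chars.isspace d) = []
        then (acc, b ++ line, false)
        else (acc ++ [String.ofList (b ++ line.takeWhile (fun d => !PySem.Chars.isspace d))], [], true)) := by
  induction line generalizing acc b with
  | nil => simp
  | cons c rest ih =>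
    have hc : c ≠ '\n' := by intro h; exact hn (h ▸ List.mem_cons_self)
    have hd' : ∀ d ∈ rest, pvIsWs d = PySem.Chars.isspace d :=
      fun d hdm => hd d (List.mem_cons_of_mem _ hdm)
    have hn' : '\n' ∉ rest := fun h => hn (List.mem_cons_of_mem _ h)
    have hcd := hd c List.mem_cons_self
    rw [List.foldl_cons]
    by_cases hw : PySem.Chars.isspace c
    · rw [pvStep_ws _ _ _ _ (hcd.trans (by simpa using hw)), if_pos hb, if_neg hc, if_pos hb]
      rw [pvRun_taken rest hd' hn']
      rw [List.dropWhile_cons_of_neg (by simpa using hw),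
        List.takeWhile_cons_of_neg (by simpa using hw)]
      simp
    · rw [pvStep_nonws _ _ _ _ (by rw [hcd]; simpa using hw)]
      simp only [Bool.false_eq_true, if_false]
      rw [ih hd' hn' acc (b ++ [c]) (by simp)]
      rw [List.dropWhile_cons_of_pos (by simpa using hw),
        List.takeWhile_cons_of_pos (by simpa using hw)]
      split <;> simp





theorem pvTokens_head_ne_nil (l : List Char) (w : List Char) (t : List (List Char))
    (h : pvTokens l = w :: t) : w ≠ [] := by
  induction l with
  | nil => rw [pvTokens_nil] at h; exact absurd h (by simp)
  | cons c rest ih =>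
    rw [pvTokens_cons] at h
    by_cases hs : PySem.Chars.isspace c
    · rw [if_pos hs] at h; exact ih h
    · rw [if_neg hs] at h
      injection h with h1 _
      rw [← h1]
      simp

theorem pvRun_line (line : List Char) (hd : ∀ c ∈ line, pvIsWs c = PySem.Chars.isspace c)
    (hn : '\n' ∉ line) (acc : List String) :
    line.foldl pvStep (acc, [], false) =
      (match pvTokens line with
        | [] => (acc, [], false)
        | w :: _ =>
          if (line.dropWhile PySem.Chars.isspace).dropWhile (fun d => !PySem.Chars.isspace d) = []
          then (acc, w, false)
          else (acc ++ [String.ofList w], [], true)) := by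
  induction line generalizing acc with
  | nil => simp [pvTokens_nil]
  | cons c rest ih =>
    have hc : c ≠ '\n' := by intro h; exact hn (h ▸ List.mem_cons_self)
    have hd' : ∀ d ∈ rest, pvIsWs d = PySem.Chars.isspace d :=
      fun d hdm => hd d (List.mem_cons_of_mem _ hdm)
    have hn' : '\n' ∉ rest := fun h => hn (List.mem_cons_of_mem _ h)
    have hcd := hd c List.mem_cons_self
    rw [List.foldl_cons]
    by_cases hw : PySem.Chars.isspace c
    · rw [pvStep_ws _ _ _ _ (hcd.trans (by simpa using hw))]
      simp only [ne_eq, not_true_eq_false, if_false, if_neg hc]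
      rw [ih hd' hn' acc, pvTokens_cons, if_pos hw,
        List.dropWhile_cons_of_pos (by simpa using hw)]
    · rw [pvStep_nonws _ _ _ _ (by rw [hcd]; simpa using hw)]
      simp only [Bool.false_eq_true, if_false, List.nil_append]
      rw [pvRun_word rest hd' hn' acc [c] (by simp)]
      rw [pvTokens_cons, if_neg hw, List.dropWhile_cons_of_neg (by simpa using hw),
        List.dropWhile_cons_of_pos (by simpa using hw)]
      by_cases hrest : rest.dropWhile (fun d => !PySem.Chars.isspace d) = []
      · have : rest.takeWhile (fun d => !PySem.Chars.isspace d) = rest :=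
          List.takeWhile_eq_self_iff.mpr (List.dropWhile_eq_nil_iff.mp hrest)
        simp [hrest, this]
      · simp [hrest]

def pvLines : List Char → List (List Char)
  | [] => [[]]
  | c :: rest =>
    if c = '\n' then [] :: pvLines rest
    else match pvLines rest with
      | [] => [[c]]
      | h :: t => (c :: h) :: t

theorem pvLines_ne_nil (l : List Char) : pvLines l ≠ [] := by
  induction l with
  | nil => simp [pvLines]
  | cons c rest ih =>
    rw [pvLines]
    split
    · simp
    · cases h : pvLines rest with
      | nil => simp
      | cons a b => simp


theorem pvLines_no_newline (l : List Char) (h : '\n' ∉ l) : pvLines l = [l] := by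
  induction l with
  | nil => rfl
  | cons c rest ih =>
    rw [pvLines, if_neg (fun hc => h (by rw [hc]; exact List.mem_cons_self)),
      ih (fun hm => h (List.mem_cons_of_mem _ hm))]

theorem pvLines_append_newline (line rest : List Char) (h : '\n' ∉ line) :
    pvLines (line ++ '\n' :: rest) = line :: pvLines rest := by
  induction line with
  | nil => simp [pvLines]
  | cons c line' ih =>
    rw [List.cons_append, pvLines, if_neg (fun hc => h (by rw [hc]; exact List.mem_cons_self)),
      ih (fun hm => h (List.mem_cons_of_mem _ hm))]

-- finalize
def pvFin (st : List String × List Char × Bool) : List String :=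
  if st.2.1 ≠ [] then st.1 ++ [String.ofList st.2.1] else st.1

theorem pvB_main (n : Nat) (cs : List Char) (hcs : cs.length = n)
    (hd : ∀ c ∈ cs, pvIsWs c = PySem.Chars.isspace c) (acc : List String) :
    pvFin (cs.foldl pvStep (acc, [], false)) = acc ++ (pvLines cs).flatMap pvFw := by
  induction n using Nat.strong_induction_on generalizing cs acc with
  | _ n ih =>
    set line := cs.takeWhile (fun c => c != '\n') with hline
    have hnl : '\n' ∉ line := by
      intro hm
      have := List.mem_takeWhile_imp hm
      simp at this
    have hdl : ∀ c ∈ line, pvIsWs c = PySem.Chars.isspace c :=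
      fun c hm => hd c ((List.takeWhile_sublist _).mem hm)
    rcases hdrop : cs.dropWhile (fun c => c != '\n') with _ | ⟨c0, rest⟩
    · -- no newline: cs = line
      have hcseq : cs = line := by
        conv_lhs => rw [← List.takeWhile_append_dropWhile (p := fun c => c != '\n') (l := cs)]
        rw [hdrop, List.append_nil]
      rw [hcseq, pvRun_line line hdl hnl acc, pvLines_no_newline line hnl]
      rcases ht : pvTokens line with _ | ⟨w, t⟩
      · simp [pvFin, pvFw, ht]
      · have hw : w ≠ [] := pvTokens_head_ne_nil line w t ht
        by_cases hcond : (line.dropWhile PySem.Chars.isspace).dropWhile (fun d => !PySem.Chars.isspace d) = [] <;>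
          simp [pvFin, pvFw, ht, hw, hcond]
    · -- cs = line ++ '\n' :: rest
      have hc0 : c0 = '\n' := by
        have := List.head_dropWhile_not (p := fun c => c != '\n') (l := cs)
        rw [hdrop] at this
        simpa using this
      subst hc0
      have hcseq : cs = line ++ '\n' :: rest := by
        conv_lhs => rw [← List.takeWhile_append_dropWhile (p := fun c => c != '\n') (l := cs)]
        rw [hdrop]
      have hrest : rest.length < n := by
        rw [← hcs, hcseq]
        simp
        omega
      have hdr : ∀ c ∈ rest, pvIsWs c = PySem.Chars.isspace c :=
        fun c hm => hd c (hcseq ▸ List.mem_append_right _ (List.mem_cons_of_mem _ hm))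
      rw [hcseq, List.foldl_append, List.foldl_cons, pvRun_line line hdl hnl acc]
      have hnlws : pvIsWs '\n' = true := by decide
      have hstate : pvStep (match pvTokens line with
          | [] => (acc, [], false)
          | w :: _ =>
            if (line.dropWhile PySem.Chars.isspace).dropWhile (fun d => !PySem.Chars.isspace d) = []
            then (acc, w, false)
            else (acc ++ [String.ofList w], [], true)) '\n' = (acc ++ pvFw line, [], false) := by
        rcases ht : pvTokens line with _ | ⟨w, t⟩
        · simp [pvStep_ws _ _ _ _ hnlws, pvFw, ht]
        · have hw : w ≠ [] := pvTokens_head_ne_nil line w t ht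
          by_cases hcond : (line.dropWhile PySem.Chars.isspace).dropWhile (fun d => !PySem.Chars.isspace d) = [] <;>
            simp [pvStep_ws _ _ _ _ hnlws, pvFw, ht, hw, hcond]
      rw [hstate, ih rest.length hrest rest rfl hdr (acc ++ pvFw line),
        pvLines_append_newline line rest hnl]
      simp

theorem pvRun_ws_start (pre : List Char) (h : ∀ c ∈ pre, pvIsWs c = true) (acc : List String) :
    pre.foldl pvStep (acc, [], false) = (acc, [], false) := by
  induction pre with
  | nil => rfl
  | cons c rest ih =>
    rw [List.foldl_cons, pvStep_ws _ _ _ _ (h c List.mem_cons_self)]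
    simp only [ne_eq, not_true_eq_false, if_false, ite_self]
    exact ih (fun d hm => h d (List.mem_cons_of_mem _ hm))

theorem pvFin_ws_end (sfx : List Char) (h : ∀ c ∈ sfx, pvIsWs c = true) :
    ∀ (a : List String) (b : List Char) (t : Bool),
    pvFin (sfx.foldl pvStep (a, b, t)) = pvFin (a, b, t) := by
  induction sfx with
  | nil => intro a b t; rfl
  | cons c rest ih =>
    intro a b t
    rw [List.foldl_cons, pvStep_ws _ _ _ _ (h c List.mem_cons_self)]
    by_cases hb : b = []
    · rw [if_neg (by simp [hb])]
      rw [ih (fun d hm => h d (List.mem_cons_of_mem _ hm))]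
      simp [pvFin, hb]
    · rw [if_pos hb]
      rw [ih (fun d hm => h d (List.mem_cons_of_mem _ hm))]
      simp [pvFin, hb]
theorem pv_splitOn_go (fuel : Nat) : ∀ (l cur : List Char) (acc : List (List Char)),
    l.length < fuel → PySem.Chars.splitOn.go ['\n'] fuel l cur acc =
      acc.reverse ++ (match pvLines l with
        | [] => []
        | h :: t => (cur.reverse ++ h) :: t) := by
  induction fuel with
  | zero => intro l cur acc h; omega
  | succ f ih =>
    intro l cur acc h
    cases l with
    | nil => simp [PySem.Chars.splitOn.go, pvLines]
    | cons c rest =>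
      by_cases hc : c = '\n'
      · subst hc
        rw [PySem.Chars.splitOn.go]
        simp only [List.isPrefixOf, List.length_cons] at *
        rw [if_pos (by simp)]
        have hdrop : List.drop (List.length ([] : List Char) + 1) ('\n' :: rest) = rest := by simp
        rw [hdrop, ih rest [] (cur.reverse :: acc) (by omega)]
        rcases hl : pvLines rest with _ | ⟨hh, tt⟩
        · exact absurd hl (pvLines_ne_nil rest)
        · simp [pvLines, hl]
      · rw [PySem.Chars.splitOn.go]
        rw [if_neg (by simp [List.isPrefixOf, BEq.beq]; intro hq; exact absurd hq.symm hc)]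
        rw [ih rest (c :: cur) acc (by simp at h ⊢; omega)]
        rcases hl : pvLines rest with _ | ⟨hh, tt⟩
        · exact absurd hl (pvLines_ne_nil rest)
        · simp [pvLines, hl, hc]

theorem pv_splitOn_eq (s : List Char) : PySem.Chars.splitOn s ['\n'] = pvLines s := by
  rw [PySem.Chars.splitOn, pv_splitOn_go (s.length + 1) s [] [] (by omega)]
  rcases hl : pvLines s with _ | ⟨hh, tt⟩
  · exact absurd hl (pvLines_ne_nil s)
  · simp

theorem pv_char_eq_iff_toNat (c d : Char) : c = d ↔ c.toNat = d.toNat :=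
  ⟨fun h => h ▸ rfl, fun h => Char.le_antisymm (Char.le_def.mpr (le_of_eq h)) (Char.le_def.mpr (ge_of_eq h))⟩

theorem pvIsWs_eq_isspace (c : Char) (h : pvDomChar c = true) :
    pvIsWs c = PySem.Chars.isspace c := by
  simp only [pvDomChar, Bool.or_eq_true, Bool.and_eq_true, decide_eq_true_eq, beq_iff_eq] at h
  rw [Bool.eq_iff_iff]
  simp only [pvIsWs, PySem.Chars.isspace, List.contains_eq_any_beq, List.any_eq_true,
    List.mem_cons, List.not_mem_nil, or_false, beq_iff_eq, decide_eq_true_eq, Bool.or_eq_true,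
    Bool.and_eq_true]
  constructor
  · rintro ⟨x, hx, he⟩
    rw [pv_char_eq_iff_toNat] at he
    rcases hx with rfl | rfl | rfl | rfl | rfl | rfl <;> simp at he <;> omega
  · intro hx
    rcases h with (((⟨h1, h2⟩ | h) | h) | h)
    · exact ⟨' ', Or.inl rfl, by rw [pv_char_eq_iff_toNat]; show c.toNat = 32; omega⟩
    · exact ⟨'\t', Or.inr (Or.inl rfl), by rw [pv_char_eq_iff_toNat]; show c.toNat = 9; omega⟩
    · exact ⟨'\n', Or.inr (Or.inr (Or.inl rfl)), by rw [pv_char_eq_iff_toNat]; show c.toNat = 10; omega⟩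
    · exact ⟨'\r', Or.inr (Or.inr (Or.inr (Or.inl rfl))), by rw [pv_char_eq_iff_toNat]; show c.toNat = 13; omega⟩

theorem pv_mem_lstrip (l : List Char) (c : Char) (h : c ∈ PySem.Chars.lstrip l) : c ∈ l := by
  rw [PySem.Chars.lstrip] at h
  exact (List.dropWhile_sublist _).subset h

theorem pv_mem_rstrip (l : List Char) (c : Char) (h : c ∈ PySem.Chars.rstrip l) : c ∈ l := by
  rw [PySem.Chars.rstrip] at h
  rw [List.mem_reverse] at h
  exact List.mem_reverse.mp ((List.dropWhile_sublist _).subset h)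

theorem pv_mem_strip (l : List Char) (c : Char) (h : c ∈ PySem.Chars.strip l) : c ∈ l := by
  rw [PySem.Chars.strip] at h
  exact pv_mem_lstrip l c (pv_mem_rstrip _ c h)

-- B is insensitive to stripping the document first
theorem pvB_strip (cs : List Char) (hd : ∀ c ∈ cs, pvIsWs c = PySem.Chars.isspace c) :
    pvFin (cs.foldl pvStep ([], [], false)) =
      pvFin ((PySem.Chars.strip cs).foldl pvStep ([], [], false)) := by
  have hdecomp : cs = cs.takeWhile PySem.Chars.isspace ++
      (PySem.Chars.strip cs ++ ((PySem.Chars.lstrip cs).reverse.takeWhile PySem.Chars.isspace).reverse) := by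
    rw [PySem.Chars.strip, PySem.Chars.rstrip]
    conv_lhs => rw [← List.takeWhile_append_dropWhile (p := PySem.Chars.isspace) (l := cs)]
    congr 1
    rw [PySem.Chars.lstrip]
    conv_lhs => rw [← List.reverse_reverse (cs.dropWhile PySem.Chars.isspace),
      ← List.takeWhile_append_dropWhile (p := PySem.Chars.isspace)
        (l := (cs.dropWhile PySem.Chars.isspace).reverse)]
    rw [List.reverse_append]
  conv_lhs => rw [hdecomp]
  rw [List.foldl_append, pvRun_ws_start _ (fun c hm => by
    rw [hd c ((List.takeWhile_sublist _).subset hm)]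
    exact List.mem_takeWhile_imp hm)]
  rw [List.foldl_append, pvFin_ws_end _ (fun c hm => by
    rw [List.mem_reverse] at hm
    have hmem : c ∈ PySem.Chars.lstrip cs := by
      rw [← List.mem_reverse]
      exact (List.takeWhile_sublist _).subset hm
    rw [hd c (pv_mem_lstrip cs c hmem)]
    exact List.mem_takeWhile_imp hm)]

-- ===== VERDICT (by name: the statement is the Claim_ definition above) =====
theorem commands_list_spec : Claim_equal_commands_list := by
  unfold Claim_equal_commands_list
  intro doc hdom
  unfold Spec_commands_list
  have hd : ∀ c ∈ doc.toList, pvIsWs c = PySem.Chars.isspace c := by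
    intro c hm
    apply pvIsWs_eq_isspace
    have := hdom
    unfold Dom_commands_list pvDomStr at this
    exact List.all_eq_true.mp this c hm
  have hA : commands_list doc =
      [] ++ (pvLines (PySem.Chars.strip doc.toList)).flatMap pvFw := by
    rw [commands_list, pv_splitOn_eq, pvA_foldl]
  have hB : commands_list_alt doc = pvFin (doc.toList.foldl pvStep ([], [], false)) := rfl
  rw [hA, hB, pvB_strip doc.toList hd,
    pvB_main (PySem.Chars.strip doc.toList).length _ rfl
      (fun c hm => hd c (pv_mem_strip doc.toList c hm)) []]
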